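-- pv_equiv track=rewrite | github.com/Mr-Destructive/advent_of_code | Aoc2021/src/d3.py | find_most_zerone
-- ===== SOURCE A (Python) =====
-- def find_most_zerone(binary_list, bit, ox_co2):
--
--     zero, one = 0, 0
--     z_list, o_list = [], []
--     bin_list = []
--     entries = len(binary_list)
--
--     for j in range(0, entries):
--         if binary_list[j][bit] == '0':
--             zero += 1
--             z_list.append(binary_list[j])
--         else:
--             one += 1
--             o_list.append(binary_list[j])
--
--     if zero > one:
--         if ox_co2 == '1':
--             common = 0
--             bin_list = z_list
--         else:
--             common = 1
--             bin_list = o_list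
--     else:
--         if ox_co2 == '1':
--             common = 1
--             bin_list = o_list
--         else:
--             common = 0
--             bin_list = z_list
--
--
--     if common is None:
--         for j in bin_list:
--             if j[bit] == ox_co2:
--                 bin_list = j
--
--     return bin_list
-- ===== SOURCE B (Python) =====
-- def find_most_zerone(binary_list, bit, ox_co2):
--     zeros = sum(1 for x in binary_list if x[bit] == '0')
--     keep_zero = (zeros > len(binary_list) - zeros) == (ox_co2 == '1')
--     if keep_zero:
--         return [x for x in binary_list if x[bit] == '0']
--     return [x for x in binary_list if x[bit] != '0']
-- ===== Notes on version B (the rewrite author's own statement) =====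
-- stated objective: simpler
-- what changed: B replaces A's single pass that builds both partition lists and both counters (then selects one list via a four-way branch) by one counting pass plus a boolean keep_zero that picks the filter predicate for one list comprehension.
import Mathlib
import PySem

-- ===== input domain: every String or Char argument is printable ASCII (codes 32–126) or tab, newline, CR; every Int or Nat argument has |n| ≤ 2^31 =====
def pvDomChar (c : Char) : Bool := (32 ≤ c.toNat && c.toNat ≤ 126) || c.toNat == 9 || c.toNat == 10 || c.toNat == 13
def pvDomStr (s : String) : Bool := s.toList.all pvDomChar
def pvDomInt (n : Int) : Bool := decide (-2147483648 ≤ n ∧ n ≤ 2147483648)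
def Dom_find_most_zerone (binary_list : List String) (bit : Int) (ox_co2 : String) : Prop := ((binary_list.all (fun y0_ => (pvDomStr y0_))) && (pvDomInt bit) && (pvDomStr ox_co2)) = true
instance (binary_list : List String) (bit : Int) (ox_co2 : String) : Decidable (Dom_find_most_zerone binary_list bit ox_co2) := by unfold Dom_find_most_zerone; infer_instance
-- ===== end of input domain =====

-- B keeps a single zero-count and does one filtering pass over the list,
-- instead of A's simultaneous two-list partition; objective: simpler.
-- Both Pythons raise IndexError when 'bit' is out of range for some element; Pre_ excludes exactly that.


-- ===== PORT A =====
-- the bit test both Pythons write: binary_list[j][bit] == '0'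
def pvP (bit : Int) (s : String) : Bool := PySem.Str.pyGet? s bit == some '0'

-- one loop step of A: state (zero, one, z_list, o_list)
def pvStepA (bit : Int) (st : Int × Int × List String × List String) (s : String) :
    Int × Int × List String × List String :=
  if pvP bit s then
    (st.1 + 1, st.2.1, st.2.2.1 ++ [s], st.2.2.2)
  else
    (st.1, st.2.1 + 1, st.2.2.1, st.2.2.2 ++ [s])

def find_most_zerone (binary_list : List String) (bit : Int) (ox_co2 : String) : List String :=
  let entries : Int := binary_list.length
  let st := (PySem.List.pyRange 0 entries 1).foldl
    (fun st j => pvStepA bit st (PySem.List.pyGetD binary_list j "")) (0, 0, [], [])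
  let zero := st.1
  let one := st.2.1
  let z_list := st.2.2.1
  let o_list := st.2.2.2
  -- 'common' is assigned 0 or 1 on every branch, so A's trailing
  -- 'if common is None' loop is dead code and has no Lean counterpart
  if zero > one then (if ox_co2 == "1" then z_list else o_list)
  else (if ox_co2 == "1" then o_list else z_list)

-- ===== PORT B =====
def find_most_zerone_alt (binary_list : List String) (bit : Int) (ox_co2 : String) : List String :=
  let zeros := binary_list.countP (pvP bit)
  let keep_zero := decide (binary_list.length - zeros < zeros) == (ox_co2 == "1")
  if keep_zero then binary_list.filter (pvP bit)
  else binary_list.filter (fun s => !(pvP bit s))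

-- ===== PRECONDITION & SPEC =====
-- Pre_ holds exactly when bit is a valid Python index into every list element
-- (otherwise both A and B raise IndexError).
def Pre_find_most_zerone (binary_list : List String) (bit : Int) (ox_co2 : String) : Prop :=
  ∀ s ∈ binary_list, PySem.Raise.InRange s.toList.length bit
instance (binary_list : List String) (bit : Int) (ox_co2 : String) : Decidable (Pre_find_most_zerone binary_list bit ox_co2) := by unfold Pre_find_most_zerone; infer_instance

def pvWitness_find_most_zerone : List String × Int × String := (["01", "10", "00"], 0, "1")

def Spec_find_most_zerone (binary_list : List String) (bit : Int) (ox_co2 : String) (out : List String) : Prop := out = find_most_zerone_alt binary_list bit ox_co2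
instance (binary_list : List String) (bit : Int) (ox_co2 : String) (out : List String) : Decidable (Spec_find_most_zerone binary_list bit ox_co2 out) := by unfold Spec_find_most_zerone; infer_instance

-- ===== CLAIM (what is proved, stated in full; the proofs are below) =====
def Claim_equal_find_most_zerone : Prop := ∀ (binary_list : List String) (bit : Int) (ox_co2 : String), Dom_find_most_zerone binary_list bit ox_co2 → Pre_find_most_zerone binary_list bit ox_co2 → Spec_find_most_zerone binary_list bit ox_co2 (find_most_zerone binary_list bit ox_co2)

-- ===== LEMMAS AND PROOFS =====

-- A's loop computes the two counts and the two filtered sublists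
theorem pvFoldA (bit : Int) (l : List String) (z o : Int) (zs os : List String) :
    l.foldl (pvStepA bit) (z, o, zs, os) =
      (z + l.countP (pvP bit),
       o + l.countP (fun s => !(pvP bit s)),
       zs ++ l.filter (pvP bit),
       os ++ l.filter (fun s => !(pvP bit s))) := by
  induction l generalizing z o zs os with
  | nil => simp
  | cons a t ih =>
    simp only [List.foldl_cons, pvStepA, List.countP_cons, List.filter_cons]
    by_cases h : pvP bit a = true <;>
      simp [h, ih] <;> omega

theorem pvCount_not (bit : Int) (l : List String) :
    l.countP (fun s => !(pvP bit s)) = l.length - l.countP (pvP bit) := by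
  induction l with
  | nil => simp
  | cons a t ih =>
    have hle : t.countP (pvP bit) ≤ t.length := List.countP_le_length
    simp only [List.countP_cons, List.length_cons]
    by_cases h : pvP bit a = true <;> simp [h, ih] <;> omega

theorem find_most_zerone_spec : Claim_equal_find_most_zerone := by
  unfold Claim_equal_find_most_zerone
  intro bl bit oc _ _
  unfold Spec_find_most_zerone
  simp only [find_most_zerone, find_most_zerone_alt]
  rw [PySem.List.foldl_pyRange_zero_pyGetD' bl "" (pvStepA bit) (0, 0, [], [])]
  rw [pvFoldA]
  simp only [List.nil_append, zero_add]
  have hle : bl.countP (pvP bit) ≤ bl.length := List.countP_le_length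
  have hcnt := pvCount_not bit bl
  have hiff : ((bl.countP (fun s => !(pvP bit s)) : Int) < (bl.countP (pvP bit) : Int)) ↔
      (bl.length - bl.countP (pvP bit) < bl.countP (pvP bit)) := by omega
  by_cases hk : bl.length - bl.countP (pvP bit) < bl.countP (pvP bit) <;>
    by_cases ho : (oc == "1") = true <;>
      simp [gt_iff_lt, hiff, hk, ho]
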